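-- pv_equiv track=rewrite | github.com/keedjk7/Data-Structure | Lab2/63010139_Lab2_5.py | bon
-- ===== SOURCE A (Python) =====
-- def bon(w):
--     keep_check = ''
--     have_same_char = False
--     for i in range(len(w)):
--         if keep_check == w[i]:
--             have_same_char = True
--             break
--         keep_check = w[i]
--
--     num = 0
--     if have_same_char == True:
--         num += (ord(keep_check.lower())-96)*4
--
--     return num
-- ===== SOURCE B (Python) =====
-- def bon(w):
--     # B: for each distinct character c, locate the first occurrence of the
--     # doubled substring c+c with str.find, and take the one at the smallest
--     # index; the first adjacent equal pair is exactly that minimum.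
--     best = None
--     for c in dict.fromkeys(w):
--         i = w.find(c + c)
--         if i != -1 and (best is None or i < best[0]):
--             best = (i, c)
--     return 0 if best is None else (ord(best[1].lower()) - 96) * 4
-- ===== Notes on version B (the rewrite author's own statement) =====
-- stated objective: alternative
-- what changed: Replaces A's stateful previous-character scan with a substring-search formulation: for each distinct character c it locates w.find(c+c) and returns the value of the character whose doubled occurrence is at the minimal index.
import Mathlib
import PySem

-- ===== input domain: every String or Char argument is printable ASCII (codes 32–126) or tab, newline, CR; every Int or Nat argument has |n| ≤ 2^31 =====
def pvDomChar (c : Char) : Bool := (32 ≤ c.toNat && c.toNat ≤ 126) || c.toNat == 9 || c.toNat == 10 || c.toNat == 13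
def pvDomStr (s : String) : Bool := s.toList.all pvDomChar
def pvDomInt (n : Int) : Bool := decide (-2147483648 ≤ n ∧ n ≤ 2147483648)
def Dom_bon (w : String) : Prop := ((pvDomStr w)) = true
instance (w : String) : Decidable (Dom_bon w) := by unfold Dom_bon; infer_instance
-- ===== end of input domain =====

-- B replaces A's stateful previous-character scan by a substring search: for each
-- distinct character c it locates w.find(c+c) and takes the minimal index (alternative; same result).

-- ===== PORT A =====
-- A's for-loop: keep_check is a string of length ≤ 1 (List Char), the break is the `true` result
def bonLoop : List Char → List Char → (List Char × Bool)
  | keep, [] => (keep, false)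
  | keep, c :: rest => if keep = [c] then (keep, true) else bonLoop [c] rest

def bon (w : String) : Int :=
  let r := bonLoop [] w.toList
  let num : Int := 0
  if r.2 then num + ((PySem.Chars.lowerChar r.1.headI).toNat - 96) * 4 else num

-- ===== PORT B =====
-- Source B's loop body: update `best` with (w.find(c+c), c) when found and smaller
def bonStep (l : List Char) (best : Option (Int × Char)) (c : Char) : Option (Int × Char) :=
  let i := PySem.Chars.find l [c, c]
  if i ≠ -1 ∧ (best = none ∨ ∀ p ∈ best, i < p.1) then some (i, c) else best

def bon_alt (w : String) : Int :=
  let l := w.toList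
  match (PySem.List.dedup l).foldl (bonStep l) none with   -- dict.fromkeys(w)
  | none => 0
  | some p => ((PySem.Chars.lowerChar p.2).toNat - 96) * 4

-- ===== PRECONDITION & SPEC =====
def Spec_bon (w : String) (out : Int) : Prop := out = bon_alt w
instance (w : String) (out : Int) : Decidable (Spec_bon w out) := by unfold Spec_bon; infer_instance

-- ===== CLAIM (what is proved, stated in full; the proofs are below) =====
def Claim_equal_bon : Prop := ∀ (w : String), Dom_bon w → Spec_bon w (bon w)

-- ===== LEMMAS AND PROOFS =====

-- First adjacent equal pair of a list: its index and character
def firstAdj : List Char → Option (Nat × Char)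
  | a :: b :: rest => if a = b then some (0, a) else (firstAdj (b :: rest)).map (fun p => (p.1 + 1, p.2))
  | _ => none

theorem bonLoop_char (l : List Char) : ∀ (p : Char),
    (if (bonLoop [p] l).2 then some (bonLoop [p] l).1.headI else none)
      = (firstAdj (p :: l)).map Prod.snd := by
  induction l with
  | nil => intro p; simp [bonLoop, firstAdj]
  | cons c rest ih =>
    intro p
    by_cases h : p = c
    · subst h; simp [bonLoop, firstAdj]
    · have h' : ¬ ([p] = [c]) := by simpa using h
      simp only [bonLoop, if_neg h', firstAdj, if_neg h, ih c]
      cases firstAdj (c :: rest) <;> simp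

theorem firstAdj_none (l : List Char) (h : firstAdj l = none) :
    ∀ (j : Nat) (c : Char), ¬ ([c, c] <+: l.drop j) := by
  induction l with
  | nil => intro j c hp; simp at hp
  | cons a t ih =>
    cases t with
    | nil =>
      intro j c hp
      rcases hp with ⟨s, hs⟩
      cases j with
      | zero => simp at hs
      | succ j => simp at hs
    | cons b rest =>
      have hab : ¬ a = b := by
        by_contra hab; subst hab; simp [firstAdj] at h
      have ht : firstAdj (b :: rest) = none := by
        simp [firstAdj, hab] at h
        cases hfa : firstAdj (b :: rest) with
        | none => rfl
        | some p => rw [hfa] at h; simp at h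
      intro j c hp
      cases j with
      | zero =>
        rcases hp with ⟨s, hs⟩
        simp at hs
        exact hab (hs.1.symm.trans hs.2.1)
      | succ j => exact ih ht j c hp

theorem firstAdj_some (l : List Char) (k : Nat) (c : Char)
    (h : firstAdj l = some (k, c)) :
    [c, c] <+: l.drop k ∧ (∀ j < k, ∀ d : Char, ¬ ([d, d] <+: l.drop j)) := by
  induction l generalizing k with
  | nil => simp [firstAdj] at h
  | cons a t ih =>
    cases t with
    | nil => simp [firstAdj] at h
    | cons b rest =>
      by_cases hab : a = b
      · subst hab
        rw [firstAdj, if_pos rfl] at h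
        obtain ⟨hk, hc⟩ : 0 = k ∧ a = c := by
          constructor <;> [exact congrArg (·.1) (Option.some.inj h); exact congrArg (·.2) (Option.some.inj h)]
        subst hk; subst hc
        refine ⟨⟨rest, by simp⟩, fun j hj d hp => absurd hj (by omega)⟩
      · rw [firstAdj, if_neg hab] at h
        cases hfa : firstAdj (b :: rest) with
        | none => rw [hfa] at h; simp at h
        | some p =>
          rw [hfa] at h
          simp at h
          obtain ⟨hk, hc⟩ := h
          obtain ⟨hp1, hp2⟩ := ih (k := p.1) (by rw [hfa]; cases p; simp_all)
          constructor
          · rw [← hk]; simpa using hp1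
          · intro j hj d hp
            cases j with
            | zero =>
              rcases hp with ⟨s, hs⟩
              simp at hs
              exact hab (hs.1.symm.trans hs.2.1)
            | succ j =>
              exact hp2 j (by omega) d (by simpa using hp)

theorem prefix_drop_head (l : List Char) (j : Nat) (c : Char)
    (h : [c, c] <+: l.drop j) : (l.drop j).head? = some c := by
  rcases h with ⟨s, hs⟩
  rw [← hs]; simp

-- the fold keeps (k, c*) once reached, if no found index is below k
theorem fold_keep (l : List Char) (k : Int) (cstar : Char) :
    ∀ (cs : List Char),
    (∀ c ∈ cs, PySem.Chars.find l [c, c] ≠ -1 → k ≤ PySem.Chars.find l [c, c]) →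
    cs.foldl (bonStep l) (some (k, cstar)) = some (k, cstar) := by
  intro cs
  induction cs with
  | nil => intro _; rfl
  | cons c cs ih =>
    intro hall
    have hc := hall c (by simp)
    have hstep : bonStep l (some (k, cstar)) c = some (k, cstar) := by
      unfold bonStep
      by_cases hne : PySem.Chars.find l [c, c] = -1
      · simp [hne]
      · have hk := hc hne
        simp only [hne, ne_eq, not_false_eq_true, true_and]
        rw [if_neg]
        rintro (h1 | h2)
        · simp at h1
        · have := h2 (k, cstar) rfl
          omega
    simp only [List.foldl_cons, hstep]
    exact ih (fun c hc => hall c (by simp [hc]))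

-- the fold finds the unique strict minimum
theorem fold_min (l : List Char) (k : Int) (cstar : Char)
    (hkfind : PySem.Chars.find l [cstar, cstar] = k) (hk0 : 0 ≤ k) :
    ∀ (cs : List Char) (acc : Option (Int × Char)),
    cstar ∈ cs →
    (∀ c ∈ cs, PySem.Chars.find l [c, c] ≠ -1 →
        k ≤ PySem.Chars.find l [c, c] ∧ (PySem.Chars.find l [c, c] = k → c = cstar)) →
    (acc = none ∨ ∃ i d, acc = some (i, d) ∧ k < i) →
    cs.foldl (bonStep l) acc = some (k, cstar) := by
  intro cs
  induction cs with
  | nil => intro acc hmem; simp at hmem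
  | cons c cs ih =>
    intro acc hmem hall hacc
    by_cases hcc : c = cstar
    · subst hcc
      have hstep : bonStep l acc c = some (k, c) := by
        unfold bonStep
        rw [hkfind, if_pos]
        refine ⟨by omega, ?_⟩
        rcases hacc with h | ⟨i, d, rfl, hi⟩
        · exact Or.inl h
        · right; rintro p hp; cases hp; simpa using hi
      simp only [List.foldl_cons, hstep]
      exact fold_keep l k c cs (fun d hd hne => (hall d (by simp [hd]) hne).1)
    · have hmem' : cstar ∈ cs := by
        rcases List.mem_cons.mp hmem with h | h
        · exact absurd h.symm hcc
        · exact h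
      have hall' : ∀ d ∈ cs, PySem.Chars.find l [d, d] ≠ -1 →
          k ≤ PySem.Chars.find l [d, d] ∧ (PySem.Chars.find l [d, d] = k → d = cstar) :=
        fun d hd => hall d (by simp [hd])
      have hacc' : bonStep l acc c = none ∨
          ∃ i d, bonStep l acc c = some (i, d) ∧ k < i := by
        unfold bonStep
        by_cases hne : PySem.Chars.find l [c, c] = -1
        · simp only [hne]; simpa using hacc
        · have := hall c (by simp) hne
          have hlt : k < PySem.Chars.find l [c, c] := by
            rcases this with ⟨h1, h2⟩
            rcases lt_or_eq_of_le h1 with h | h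
            · exact h
            · exact absurd (h2 h.symm) hcc
          by_cases hcond : (PySem.Chars.find l [c, c] ≠ -1 ∧
              (acc = none ∨ ∀ p ∈ acc, PySem.Chars.find l [c, c] < p.1))
          · rw [if_pos hcond]
            exact Or.inr ⟨_, c, rfl, hlt⟩
          · rw [if_neg hcond]; exact hacc
      simp only [List.foldl_cons]
      exact ih (bonStep l acc c) hmem' hall' hacc'

-- all finds fail ⇒ the fold stays none
theorem fold_none (l : List Char)
    (h : ∀ c : Char, PySem.Chars.find l [c, c] = -1) (cs : List Char) :
    cs.foldl (bonStep l) none = none := by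
  induction cs with
  | nil => rfl
  | cons c cs ih =>
    have hstep : bonStep l none c = none := by
      unfold bonStep; simp [h c]
    simp only [List.foldl_cons, hstep]; exact ih

theorem bon_eq_firstAdj (w : String) :
    bon w = match (firstAdj w.toList).map Prod.snd with
            | none => 0
            | some c => (((PySem.Chars.lowerChar c).toNat : Int) - 96) * 4 := by
  unfold bon
  cases hl : w.toList with
  | nil => simp [bonLoop, firstAdj]
  | cons p rest =>
    have := bonLoop_char rest p
    by_cases hb : (bonLoop [p] rest).2
    · rw [if_pos hb] at this
      simp only [bonLoop]
      rw [← this]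
      simp [hb]
    · rw [if_neg hb] at this
      simp only [bonLoop]
      rw [← this]
      simp [hb]

-- ===== VERDICT (by name: the statement is the Claim_ definition above) =====
theorem bon_spec : Claim_equal_bon := by
  intro w _
  unfold Spec_bon bon_alt
  rw [bon_eq_firstAdj]
  set l := w.toList with hl
  cases hfa : firstAdj l with
  | none =>
    have hnone : ∀ c : Char, PySem.Chars.find l [c, c] = -1 := by
      intro c
      rw [PySem.Chars.find_eq_neg_one_iff]
      intro hinf
      obtain ⟨j, hj⟩ := (PySem.Chars.exists_prefix_drop_iff_isIn ..).symm.mp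
        ((PySem.Chars.isIn_iff_infix ..).mpr hinf)
      exact firstAdj_none l hfa j c hj
    simp [fold_none l hnone]
  | some p =>
    obtain ⟨k, cstar⟩ := p
    obtain ⟨hpk, hmin⟩ := firstAdj_some l k cstar hfa
    -- find l [c*,c*] = k
    have hinf : [cstar, cstar] <:+: l :=
      (PySem.Chars.isIn_iff_infix ..).mp
        ((PySem.Chars.exists_prefix_drop_iff_isIn ..).mp ⟨k, hpk⟩)
    have hfind_ne : PySem.Chars.find l [cstar, cstar] ≠ -1 :=
      (PySem.Chars.find_ne_neg_one_iff ..).mpr hinf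
    have hfind_nonneg : 0 ≤ PySem.Chars.find l [cstar, cstar] :=
      (PySem.Chars.find_nonneg_iff ..).mpr hinf
    obtain ⟨hspec1, hspec2⟩ := PySem.Chars.find_spec (s := l) (sub := [cstar, cstar]) hfind_nonneg
    have hfk : PySem.Chars.find l [cstar, cstar] = (k : Int) := by
      set m := (PySem.Chars.find l [cstar, cstar]).toNat with hm
      have hmk : ¬ m < k := fun hlt => hmin m hlt cstar hspec1
      have hkm : ¬ k < m := fun hlt => hspec2 k hlt hpk
      have : m = k := by omega
      omega
    -- every found doubled char sits at index ≥ k, with equality only for c*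
    have hall : ∀ c : Char, PySem.Chars.find l [c, c] ≠ -1 →
        k ≤ PySem.Chars.find l [c, c] ∧ (PySem.Chars.find l [c, c] = k → c = cstar) := by
      intro c hne
      have hinfc : [c, c] <:+: l := (PySem.Chars.find_ne_neg_one_iff ..).mp hne
      have hnn : 0 ≤ PySem.Chars.find l [c, c] :=
        (PySem.Chars.find_nonneg_iff ..).mpr hinfc
      obtain ⟨hs1, _⟩ := PySem.Chars.find_spec (s := l) (sub := [c, c]) hnn
      set m := (PySem.Chars.find l [c, c]).toNat with hm
      have hmk : ¬ m < k := fun hlt => hmin m hlt c hs1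
      constructor
      · omega
      · intro heq
        have hmeq : m = k := by omega
        rw [hmeq] at hs1
        have h1 := prefix_drop_head l k c hs1
        have h2 := prefix_drop_head l k cstar hpk
        rw [h1] at h2
        exact Option.some_injective _ h2
    -- c* appears in dedup l
    have hcmem : cstar ∈ PySem.List.dedup l := by
      rw [PySem.List.mem_dedup]
      have : cstar ∈ l.drop k := by
        rcases hpk with ⟨s, hs⟩
        rw [← hs]; simp
      exact List.mem_of_mem_drop this
    have hfold := fold_min l (k : Int) cstar hfk (by positivity)
      (PySem.List.dedup l) none hcmem
      (fun c hc => hall c) (Or.inl rfl)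
    have hfold' : List.foldl (bonStep l) none (PySem.Set.ofList l) = some ((k : Int), cstar) := by
      rw [← PySem.List.dedup_eq_ofList]; exact hfold
    simp [hfold']
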